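-- pv_equiv track=rewrite | github.com/GENI-NSF/geni-ch | chapi/tools/guard_utils.py | validate_uid_list
-- ===== SOURCE A (Python) =====
-- def validate_uid_list(uids, cache, label):
--     bad_uids = []
--     good_urns = []
--     for uid in uids:
--         if uid in cache:
--             good_urns.append(cache[uid])
--         else:
--             bad_uids.append(uid)
--     if len(bad_uids) > 0:
--         raise CHAPIv1ArgumentError("Unknown %s uids [%s] " % (label, bad_uids))
--     return good_urns
-- ===== SOURCE B (Python) =====
-- def validate_uid_list(uids, cache, label):
--     # EAFP: optimistically map every uid; only on failure diagnose the offenders.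
--     try:
--         return [cache[uid] for uid in uids]
--     except KeyError:
--         bad_uids = [uid for uid in uids if uid not in cache]
--         raise CHAPIv1ArgumentError("Unknown %s uids [%s] " % (label, bad_uids))
-- ===== Notes on version B (the rewrite author's own statement) =====
-- stated objective: idiomatic
-- what changed: Replaces A's fused loop that accumulates bad and good lists simultaneously with an EAFP control flow: optimistically map every uid in one direct lookup comprehension, and only on a KeyError fall back to diagnosing the unknown uids and raising the same error.
import Mathlib
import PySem

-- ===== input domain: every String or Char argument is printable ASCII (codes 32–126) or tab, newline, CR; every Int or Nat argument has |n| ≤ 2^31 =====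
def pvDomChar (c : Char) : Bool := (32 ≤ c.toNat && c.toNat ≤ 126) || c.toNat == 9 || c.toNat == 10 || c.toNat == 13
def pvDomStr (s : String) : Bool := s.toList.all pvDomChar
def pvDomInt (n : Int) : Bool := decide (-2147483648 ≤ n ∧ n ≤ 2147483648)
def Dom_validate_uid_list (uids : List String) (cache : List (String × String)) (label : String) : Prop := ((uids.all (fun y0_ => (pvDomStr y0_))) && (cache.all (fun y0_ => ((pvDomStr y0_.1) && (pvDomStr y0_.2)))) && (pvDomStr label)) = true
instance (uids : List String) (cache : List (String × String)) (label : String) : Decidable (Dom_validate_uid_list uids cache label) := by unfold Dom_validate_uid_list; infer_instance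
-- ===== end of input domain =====

-- B replaces A's fused accumulate-good-and-bad loop by EAFP: optimistically map every uid, diagnose only on failure (idiomatic); A raises on unknown uids, excluded by Pre_.
-- ===== PORT A =====
def validate_uid_list (uids : List String) (cache : List (String × String)) (label : String) : List String :=
  -- fused loop: accumulate (bad_uids, good_urns); on the raise path (bad nonempty, excluded by Pre_) returns []
  let st := uids.foldl (fun (st : List String × List String) uid =>
    match PySem.Dict.get? (PySem.Dict.mk cache) uid with
    | some v => (st.1, st.2 ++ [v])
    | none => (st.1 ++ [uid], st.2)) ([], [])
  if st.1.length > 0 then [] else st.2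

-- ===== PORT B =====
def validate_uid_list_alt (uids : List String) (cache : List (String × String)) (label : String) : List String :=
  -- try: [cache[uid] for uid in uids]  — a KeyError (some lookup = none) takes the except/raise path (excluded by Pre_), ported as []
  match uids.mapM (fun u => PySem.Dict.get? (PySem.Dict.mk cache) u) with
  | some urns => urns
  | none => []

-- ===== PRECONDITION & SPEC =====
-- Pre_ excludes exactly the inputs where A raises CHAPIv1ArgumentError: some uid has no entry in cache.
def Pre_validate_uid_list (uids : List String) (cache : List (String × String)) (label : String) : Prop :=
  ∀ u ∈ uids, (PySem.Dict.get? (PySem.Dict.mk cache) u).isSome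
instance (uids : List String) (cache : List (String × String)) (label : String) : Decidable (Pre_validate_uid_list uids cache label) := by unfold Pre_validate_uid_list; infer_instance
def pvWitness_validate_uid_list : List String × (List (String × String)) × String := (["a", "b"], [("a", "urn:a"), ("b", "urn:b")], "member")

def Spec_validate_uid_list (uids : List String) (cache : List (String × String)) (label : String) (out : List String) : Prop := out = validate_uid_list_alt uids cache label
instance (uids : List String) (cache : List (String × String)) (label : String) (out : List String) : Decidable (Spec_validate_uid_list uids cache label out) := by unfold Spec_validate_uid_list; infer_instance

-- ===== CLAIM =====
def Claim_equal_validate_uid_list : Prop := ∀ (uids : List String) (cache : List (String × String)) (label : String), Dom_validate_uid_list uids cache label → Pre_validate_uid_list uids cache label → Spec_validate_uid_list uids cache label (validate_uid_list uids cache label)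

-- ===== LEMMAS AND PROOFS =====
-- loop invariant for A: when every uid is in the cache, the fold only extends good_urns with the looked-up values
lemma foldA_inv (cache : List (String × String)) :
    ∀ (uids : List String) (b g : List String), (∀ u ∈ uids, (PySem.Dict.get? (PySem.Dict.mk cache) u).isSome) →
    uids.foldl (fun (st : List String × List String) uid =>
      match PySem.Dict.get? (PySem.Dict.mk cache) uid with
      | some v => (st.1, st.2 ++ [v])
      | none => (st.1 ++ [uid], st.2)) (b, g)
      = (b, g ++ uids.map (fun u => (PySem.Dict.get? (PySem.Dict.mk cache) u).getD "")) := by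
  intro uids
  induction uids with
  | nil => intro b g _; simp
  | cons u us ih =>
    intro b g h
    have hu := h u (by simp)
    obtain ⟨v, hv⟩ := Option.isSome_iff_exists.mp hu
    simp only [List.foldl, hv]
    rw [ih (b) (g ++ [v]) (fun x hx => h x (by simp [hx]))]
    simp [hv]

-- B's optimistic mapM succeeds (with the looked-up values) when every uid is in the cache
lemma mapM_all_some (cache : List (String × String)) :
    ∀ (uids : List String), (∀ u ∈ uids, (PySem.Dict.get? (PySem.Dict.mk cache) u).isSome) →
    uids.mapM (fun u => PySem.Dict.get? (PySem.Dict.mk cache) u)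
      = some (uids.map (fun u => (PySem.Dict.get? (PySem.Dict.mk cache) u).getD "")) := by
  intro uids
  induction uids with
  | nil => intro _; rfl
  | cons u us ih =>
    intro h
    have hu := h u (by simp)
    obtain ⟨v, hv⟩ := Option.isSome_iff_exists.mp hu
    simp [List.mapM_cons, hv, ih (fun x hx => h x (by simp [hx]))]

-- ===== VERDICT =====
theorem validate_uid_list_spec : Claim_equal_validate_uid_list := by
  intro uids cache label _ hpre
  unfold Spec_validate_uid_list validate_uid_list validate_uid_list_alt
  rw [foldA_inv cache uids [] [] hpre, mapM_all_some cache uids hpre]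
  simp
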